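-- pv_equiv track=rewrite | github.com/1kuna/TradeML | scripts/scheduler/per_vendor.py | _group_tasks_by_vendor
-- ===== SOURCE A (Python) =====
-- from typing import Dict, Iterator, List, Optional
--
-- def _group_tasks_by_vendor(tasks: List[str]) -> Dict[str, List[str]]:
--     mapping: Dict[str, List[str]] = {"alpaca": [], "polygon": [], "finnhub": [], "fred": [], "av": [], "fmp": []}
--     for t in tasks:
--         if t in ("alpaca_bars", "alpaca_minute"):
--             mapping["alpaca"].append(t)
--         elif t in ("alpaca_options_bars", "alpaca_options_chain", "alpaca_corporate_actions"):
--             mapping["alpaca"].append(t)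
--         elif t == "polygon_bars":
--             mapping["polygon"].append(t)
--         elif t in ("finnhub_options", "finnhub_daily"):
--             mapping["finnhub"].append(t)
--         elif t == "fred_treasury":
--             mapping["fred"].append(t)
--         elif t in ("av_corp_actions", "av_options_hist"):
--             mapping["av"].append(t)
--         elif t == "fmp_fundamentals":
--             mapping["fmp"].append(t)
--     return {v: ts for v, ts in mapping.items() if ts}
-- ===== SOURCE B (Python) =====
-- _VENDOR_TASKS = [
--     ("alpaca", ("alpaca_bars", "alpaca_minute", "alpaca_options_bars",
--                 "alpaca_options_chain", "alpaca_corporate_actions")),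
--     ("polygon", ("polygon_bars",)),
--     ("finnhub", ("finnhub_options", "finnhub_daily")),
--     ("fred", ("fred_treasury",)),
--     ("av", ("av_corp_actions", "av_options_hist")),
--     ("fmp", ("fmp_fundamentals",)),
-- ]
--
-- def _group_tasks_by_vendor(tasks):
--     # Staged passes: one filtering pass over `tasks` per vendor, instead of
--     # one pass over `tasks` that buckets each task as it is seen.
--     result = {}
--     for vendor, names in _VENDOR_TASKS:
--         bucket = [t for t in tasks if t in names]
--         if bucket:
--             result[vendor] = bucket
--     return result
-- ===== Notes on version B (the rewrite author's own statement) =====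
-- stated objective: alternative
-- what changed: Instead of A's single pass over tasks that dispatches each task into a mutable per-vendor bucket via a nine-branch cascade and then drops empty buckets, B makes one filtering pass over tasks per vendor (six staged passes over a vendor->task-names table), emitting each vendor's nonempty bucket directly in vendor order.
import Mathlib
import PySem

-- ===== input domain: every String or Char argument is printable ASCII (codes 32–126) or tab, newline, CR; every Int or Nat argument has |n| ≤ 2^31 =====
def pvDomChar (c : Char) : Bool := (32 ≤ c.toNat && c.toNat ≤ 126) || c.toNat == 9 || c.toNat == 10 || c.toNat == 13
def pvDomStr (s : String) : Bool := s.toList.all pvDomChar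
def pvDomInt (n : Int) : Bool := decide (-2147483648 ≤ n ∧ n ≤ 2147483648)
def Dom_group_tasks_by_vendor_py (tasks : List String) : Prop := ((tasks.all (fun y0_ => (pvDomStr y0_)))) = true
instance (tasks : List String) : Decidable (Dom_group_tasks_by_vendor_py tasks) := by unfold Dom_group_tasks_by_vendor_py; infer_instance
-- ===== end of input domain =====

-- B replaces A's single bucketing pass (a nine-branch cascade dispatching each task into a
-- mutable per-vendor bucket) by six staged filtering passes over tasks, one per vendor from a
-- vendor->task-names table (objective: alternative; same O(n) cost).

-- ===== PORT A =====
-- one iteration of A's for-loop: the if/elif cascade over t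
def pvStepA (mapping : PySem.Dict String (List String)) (t : String) : PySem.Dict String (List String) :=
  if t == "alpaca_bars" || t == "alpaca_minute" then
    mapping.modify "alpaca" [] (fun ts => ts ++ [t])
  else if t == "alpaca_options_bars" || t == "alpaca_options_chain" || t == "alpaca_corporate_actions" then
    mapping.modify "alpaca" [] (fun ts => ts ++ [t])
  else if t == "polygon_bars" then
    mapping.modify "polygon" [] (fun ts => ts ++ [t])
  else if t == "finnhub_options" || t == "finnhub_daily" then
    mapping.modify "finnhub" [] (fun ts => ts ++ [t])
  else if t == "fred_treasury" then
    mapping.modify "fred" [] (fun ts => ts ++ [t])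
  else if t == "av_corp_actions" || t == "av_options_hist" then
    mapping.modify "av" [] (fun ts => ts ++ [t])
  else if t == "fmp_fundamentals" then
    mapping.modify "fmp" [] (fun ts => ts ++ [t])
  else mapping

def group_tasks_by_vendor_py (tasks : List String) : List (String × List String) :=
  let mapping : PySem.Dict String (List String) :=
    PySem.Dict.ofList [("alpaca", []), ("polygon", []), ("finnhub", []), ("fred", []), ("av", []), ("fmp", [])]
  let mapping := tasks.foldl pvStepA mapping
  mapping.items.filter (fun p => !p.2.isEmpty)

-- ===== PORT B =====
-- the module-level _VENDOR_TASKS table of Source B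
def pvVendorTasks : List (String × List String) :=
  [("alpaca", ["alpaca_bars", "alpaca_minute", "alpaca_options_bars",
               "alpaca_options_chain", "alpaca_corporate_actions"]),
   ("polygon", ["polygon_bars"]),
   ("finnhub", ["finnhub_options", "finnhub_daily"]),
   ("fred", ["fred_treasury"]),
   ("av", ["av_corp_actions", "av_options_hist"]),
   ("fmp", ["fmp_fundamentals"])]

-- Source B's result dict: it only ever inserts fresh keys (the distinct vendors of
-- _VENDOR_TASKS, each at most once), so 'result[vendor] = bucket' is exactly an append to
-- the assoc list (dict -> assoc list in insertion order).  '[t for t in tasks if t in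
-- names]' is tasks.filter (names.contains).
def group_tasks_by_vendor_py_alt (tasks : List String) : List (String × List String) :=
  pvVendorTasks.foldl
    (fun result p =>
      if !(tasks.filter (fun t => p.2.contains t)).isEmpty then
        result ++ [(p.1, tasks.filter (fun t => p.2.contains t))]
      else result)
    []

-- ===== PRECONDITION & SPEC =====
def Spec_group_tasks_by_vendor_py (tasks : List String) (out : List (String × List String)) : Prop := out = group_tasks_by_vendor_py_alt tasks
instance (tasks : List String) (out : List (String × List String)) : Decidable (Spec_group_tasks_by_vendor_py tasks out) := by unfold Spec_group_tasks_by_vendor_py; infer_instance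

-- ===== CLAIM (what is proved, stated in full; the proofs are below) =====
def Claim_equal_group_tasks_by_vendor_py : Prop := ∀ (tasks : List String), Dom_group_tasks_by_vendor_py tasks → Spec_group_tasks_by_vendor_py tasks (group_tasks_by_vendor_py tasks)

-- ===== LEMMAS AND PROOFS =====
-- the six per-vendor membership predicates, exactly as A's cascade tests them
def pvA (t : String) : Bool :=
  (t == "alpaca_bars" || t == "alpaca_minute") ||
  (t == "alpaca_options_bars" || t == "alpaca_options_chain" || t == "alpaca_corporate_actions")
def pvP (t : String) : Bool := t == "polygon_bars"
def pvF (t : String) : Bool := t == "finnhub_options" || t == "finnhub_daily"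
def pvR (t : String) : Bool := t == "fred_treasury"
def pvV (t : String) : Bool := t == "av_corp_actions" || t == "av_options_hist"
def pvM (t : String) : Bool := t == "fmp_fundamentals"

-- abbreviation for the six-bucket dict state of A's loop
def pvD (a p f r v m : List String) : PySem.Dict String (List String) :=
  PySem.Dict.mk [("alpaca", a), ("polygon", p), ("finnhub", f), ("fred", r), ("av", v), ("fmp", m)]

-- invariant of A's loop: each bucket accumulates the per-vendor filter of the tasks seen
theorem pvFoldA (ts : List String) (a p f r v m : List String) :
    ts.foldl pvStepA (pvD a p f r v m) =
    pvD (a ++ ts.filter pvA) (p ++ ts.filter pvP) (f ++ ts.filter pvF)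
        (r ++ ts.filter pvR) (v ++ ts.filter pvV) (m ++ ts.filter pvM) := by
  induction ts generalizing a p f r v m with
  | nil => simp [List.filter]
  | cons t ts ih =>
    by_cases h1 : t = "alpaca_bars"
    · subst h1
      have hstep : pvStepA (pvD a p f r v m) "alpaca_bars" = pvD (a ++ ["alpaca_bars"]) p f r v m := by
        simp [pvStepA, pvD, PySem.Dict.modify, PySem.Dict.contains, PySem.Dict.getD,
          PySem.Dict.get?, PySem.Dict.insert]
      simp [List.foldl_cons, hstep, ih, pvA, pvP, pvF, pvR, pvV, pvM]
    by_cases h2 : t = "alpaca_minute"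
    · subst h2
      have hstep : pvStepA (pvD a p f r v m) "alpaca_minute" = pvD (a ++ ["alpaca_minute"]) p f r v m := by
        simp [pvStepA, pvD, PySem.Dict.modify, PySem.Dict.contains, PySem.Dict.getD,
          PySem.Dict.get?, PySem.Dict.insert]
      simp [List.foldl_cons, hstep, ih, pvA, pvP, pvF, pvR, pvV, pvM]
    by_cases h3 : t = "alpaca_options_bars"
    · subst h3
      have hstep : pvStepA (pvD a p f r v m) "alpaca_options_bars" = pvD (a ++ ["alpaca_options_bars"]) p f r v m := by
        simp [pvStepA, pvD, PySem.Dict.modify, PySem.Dict.contains, PySem.Dict.getD,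
          PySem.Dict.get?, PySem.Dict.insert]
      simp [List.foldl_cons, hstep, ih, pvA, pvP, pvF, pvR, pvV, pvM]
    by_cases h4 : t = "alpaca_options_chain"
    · subst h4
      have hstep : pvStepA (pvD a p f r v m) "alpaca_options_chain" = pvD (a ++ ["alpaca_options_chain"]) p f r v m := by
        simp [pvStepA, pvD, PySem.Dict.modify, PySem.Dict.contains, PySem.Dict.getD,
          PySem.Dict.get?, PySem.Dict.insert]
      simp [List.foldl_cons, hstep, ih, pvA, pvP, pvF, pvR, pvV, pvM]
    by_cases h5 : t = "alpaca_corporate_actions"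
    · subst h5
      have hstep : pvStepA (pvD a p f r v m) "alpaca_corporate_actions" = pvD (a ++ ["alpaca_corporate_actions"]) p f r v m := by
        simp [pvStepA, pvD, PySem.Dict.modify, PySem.Dict.contains, PySem.Dict.getD,
          PySem.Dict.get?, PySem.Dict.insert]
      simp [List.foldl_cons, hstep, ih, pvA, pvP, pvF, pvR, pvV, pvM]
    by_cases h6 : t = "polygon_bars"
    · subst h6
      have hstep : pvStepA (pvD a p f r v m) "polygon_bars" = pvD a (p ++ ["polygon_bars"]) f r v m := by
        simp [pvStepA, pvD, PySem.Dict.modify, PySem.Dict.contains, PySem.Dict.getD,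
          PySem.Dict.get?, PySem.Dict.insert]
      simp [List.foldl_cons, hstep, ih, pvA, pvP, pvF, pvR, pvV, pvM]
    by_cases h7 : t = "finnhub_options"
    · subst h7
      have hstep : pvStepA (pvD a p f r v m) "finnhub_options" = pvD a p (f ++ ["finnhub_options"]) r v m := by
        simp [pvStepA, pvD, PySem.Dict.modify, PySem.Dict.contains, PySem.Dict.getD,
          PySem.Dict.get?, PySem.Dict.insert]
      simp [List.foldl_cons, hstep, ih, pvA, pvP, pvF, pvR, pvV, pvM]
    by_cases h8 : t = "finnhub_daily"
    · subst h8
      have hstep : pvStepA (pvD a p f r v m) "finnhub_daily" = pvD a p (f ++ ["finnhub_daily"]) r v m := by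
        simp [pvStepA, pvD, PySem.Dict.modify, PySem.Dict.contains, PySem.Dict.getD,
          PySem.Dict.get?, PySem.Dict.insert]
      simp [List.foldl_cons, hstep, ih, pvA, pvP, pvF, pvR, pvV, pvM]
    by_cases h9 : t = "fred_treasury"
    · subst h9
      have hstep : pvStepA (pvD a p f r v m) "fred_treasury" = pvD a p f (r ++ ["fred_treasury"]) v m := by
        simp [pvStepA, pvD, PySem.Dict.modify, PySem.Dict.contains, PySem.Dict.getD,
          PySem.Dict.get?, PySem.Dict.insert]
      simp [List.foldl_cons, hstep, ih, pvA, pvP, pvF, pvR, pvV, pvM]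
    by_cases h10 : t = "av_corp_actions"
    · subst h10
      have hstep : pvStepA (pvD a p f r v m) "av_corp_actions" = pvD a p f r (v ++ ["av_corp_actions"]) m := by
        simp [pvStepA, pvD, PySem.Dict.modify, PySem.Dict.contains, PySem.Dict.getD,
          PySem.Dict.get?, PySem.Dict.insert]
      simp [List.foldl_cons, hstep, ih, pvA, pvP, pvF, pvR, pvV, pvM]
    by_cases h11 : t = "av_options_hist"
    · subst h11
      have hstep : pvStepA (pvD a p f r v m) "av_options_hist" = pvD a p f r (v ++ ["av_options_hist"]) m := by
        simp [pvStepA, pvD, PySem.Dict.modify, PySem.Dict.contains, PySem.Dict.getD,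
          PySem.Dict.get?, PySem.Dict.insert]
      simp [List.foldl_cons, hstep, ih, pvA, pvP, pvF, pvR, pvV, pvM]
    by_cases h12 : t = "fmp_fundamentals"
    · subst h12
      have hstep : pvStepA (pvD a p f r v m) "fmp_fundamentals" = pvD a p f r v (m ++ ["fmp_fundamentals"]) := by
        simp [pvStepA, pvD, PySem.Dict.modify, PySem.Dict.contains, PySem.Dict.getD,
          PySem.Dict.get?, PySem.Dict.insert]
      simp [List.foldl_cons, hstep, ih, pvA, pvP, pvF, pvR, pvV, pvM]
    have hstep : pvStepA (pvD a p f r v m) t = pvD a p f r v m := by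
      simp [pvStepA, beq_iff_eq, h1, h2, h3, h4, h5, h6, h7, h8, h9, h10, h11, h12]
    simp [List.foldl_cons, hstep, ih, List.filter_cons, pvA, pvP, pvF, pvR, pvV, pvM,
      beq_iff_eq, h1, h2, h3, h4, h5, h6, h7, h8, h9, h10, h11, h12]

-- B's per-vendor membership filters coincide with A's cascade predicates
theorem pvFiltA (tasks : List String) :
    tasks.filter (fun t => (["alpaca_bars", "alpaca_minute", "alpaca_options_bars",
      "alpaca_options_chain", "alpaca_corporate_actions"] : List String).contains t)
    = tasks.filter pvA := by
  apply List.filter_congr; intro t _; unfold pvA; rw [Bool.eq_iff_iff]; simp; tauto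
theorem pvFiltP (tasks : List String) :
    tasks.filter (fun t => (["polygon_bars"] : List String).contains t) = tasks.filter pvP := by
  apply List.filter_congr; intro t _; unfold pvP; rw [Bool.eq_iff_iff]; simp
theorem pvFiltF (tasks : List String) :
    tasks.filter (fun t => (["finnhub_options", "finnhub_daily"] : List String).contains t) = tasks.filter pvF := by
  apply List.filter_congr; intro t _; unfold pvF; rw [Bool.eq_iff_iff]; simp
theorem pvFiltR (tasks : List String) :
    tasks.filter (fun t => (["fred_treasury"] : List String).contains t) = tasks.filter pvR := by
  apply List.filter_congr; intro t _; unfold pvR; rw [Bool.eq_iff_iff]; simp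
theorem pvFiltV (tasks : List String) :
    tasks.filter (fun t => (["av_corp_actions", "av_options_hist"] : List String).contains t) = tasks.filter pvV := by
  apply List.filter_congr; intro t _; unfold pvV; rw [Bool.eq_iff_iff]; simp
theorem pvFiltM (tasks : List String) :
    tasks.filter (fun t => (["fmp_fundamentals"] : List String).contains t) = tasks.filter pvM := by
  apply List.filter_congr; intro t _; unfold pvM; rw [Bool.eq_iff_iff]; simp

-- ===== VERDICT (by name: the statement is the Claim_ definition above) =====
set_option maxHeartbeats 2000000 in
theorem group_tasks_by_vendor_py_spec : Claim_equal_group_tasks_by_vendor_py := by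
  intro tasks _
  unfold Spec_group_tasks_by_vendor_py group_tasks_by_vendor_py group_tasks_by_vendor_py_alt
  have hinit : PySem.Dict.ofList
      ([("alpaca", []), ("polygon", []), ("finnhub", []), ("fred", []), ("av", []), ("fmp", [])] :
        List (String × List String)) = pvD [] [] [] [] [] [] := by decide
  rw [hinit]
  dsimp only
  rw [pvFoldA]
  simp only [pvVendorTasks, List.foldl_cons, List.foldl_nil,
    pvFiltA, pvFiltP, pvFiltF, pvFiltR, pvFiltV, pvFiltM]
  simp only [pvD, List.nil_append, List.filter_cons, List.filter_nil]
  split_ifs <;> simp_all
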